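-- pv_equiv track=rewrite | github.com/Kumar-Rishabh/Medical-Test-Assistant | app.py | convert_to_styled_messages
-- ===== SOURCE A (Python) =====
-- def convert_to_styled_messages(history):
--     messages = []
--     for i in range(0, len(history), 2):
--         user_msg = history[i]["content"] if i < len(history) else ""
--         assistant_msg = history[i + 1]["content"] if i + 1 < len(history) else ""
--
--         if user_msg:
--             messages.append({"role": "user", "content": user_msg})
--         if assistant_msg:
--             messages.append({"role": "assistant", "content": assistant_msg})
--
--     return messages
-- ===== SOURCE B (Python) =====
-- def convert_to_styled_messages(history):
--     messages = []
--     for idx, item in enumerate(history):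
--         role = "user" if idx % 2 == 0 else "assistant"
--         content = item["content"]
--         if content:
--             messages.append({"role": role, "content": content})
--     return messages
-- ===== Notes on version B (the rewrite author's own statement) =====
-- stated objective: simpler
-- what changed: Replaces the step-2 paired indexing with its dead i<len guard and twin append branches by a single enumerate pass that derives the role from the index parity and appends once.
import Mathlib
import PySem

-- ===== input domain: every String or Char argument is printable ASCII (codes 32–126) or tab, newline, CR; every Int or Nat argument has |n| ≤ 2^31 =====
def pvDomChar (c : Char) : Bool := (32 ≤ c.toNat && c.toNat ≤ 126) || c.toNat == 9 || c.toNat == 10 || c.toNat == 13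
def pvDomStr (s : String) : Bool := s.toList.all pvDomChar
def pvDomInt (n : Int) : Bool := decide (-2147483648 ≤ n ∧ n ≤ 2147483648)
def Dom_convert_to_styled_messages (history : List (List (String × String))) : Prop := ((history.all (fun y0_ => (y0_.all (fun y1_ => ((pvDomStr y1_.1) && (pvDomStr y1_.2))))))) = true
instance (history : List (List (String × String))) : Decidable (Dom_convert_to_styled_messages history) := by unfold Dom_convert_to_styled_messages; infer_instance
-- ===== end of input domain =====

-- B replaces A's step-2 paired indexing (with its dead i<len guard) by one enumerate
-- pass that derives the role from the index parity; same return value (objective: simpler).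

-- ===== PORT A =====
-- item["content"] on a dict: first match in the association list (Pre_ ensures the key exists)
def pvContent (d : List (String × String)) : String := (List.lookup "content" d).getD ""

-- the body of A's `for i in range(0, len(history), 2)` loop
def pvStepA (history : List (List (String × String))) (messages : List (List (String × String))) (i : Int) : List (List (String × String)) :=
  let user_msg := if i < PySem.List.len history then pvContent (PySem.List.pyGetD history i []) else ""
  let assistant_msg := if i + 1 < PySem.List.len history then pvContent (PySem.List.pyGetD history (i + 1) []) else ""
  let messages := if user_msg ≠ "" then messages ++ [[("role", "user"), ("content", user_msg)]] else messages
  if assistant_msg ≠ "" then messages ++ [[("role", "assistant"), ("content", assistant_msg)]] else messages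

def convert_to_styled_messages (history : List (List (String × String))) : List (List (String × String)) :=
  (PySem.List.pyRange 0 (PySem.List.len history) 2).foldl (pvStepA history) []

-- ===== PORT B =====
-- the body of B's `for idx, item in enumerate(history)` loop
def pvStepB (messages : List (List (String × String))) (p : Int × List (String × String)) : List (List (String × String)) :=
  let role := if PySem.Int.mod p.1 2 == 0 then "user" else "assistant"
  let content := pvContent p.2
  if content ≠ "" then messages ++ [[("role", role), ("content", content)]] else messages

def convert_to_styled_messages_alt (history : List (List (String × String))) : List (List (String × String)) :=
  (PySem.List.enumerate history).foldl pvStepB []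

-- ===== PRECONDITION & SPEC =====
-- Pre_ excludes exactly the inputs where some item lacks the key "content": there the
-- Python A raises KeyError (and B raises the same KeyError).
def Pre_convert_to_styled_messages (history : List (List (String × String))) : Prop :=
  ∀ d ∈ history, "content" ∈ d.map Prod.fst
instance (history : List (List (String × String))) : Decidable (Pre_convert_to_styled_messages history) := by unfold Pre_convert_to_styled_messages; infer_instance
def pvWitness_convert_to_styled_messages : (List (List (String × String))) :=
  [[("content", "hi")], [("content", "hello!")], [("content", "")]]
def Spec_convert_to_styled_messages (history : List (List (String × String))) (out : List (List (String × String))) : Prop := out = convert_to_styled_messages_alt history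
instance (history : List (List (String × String))) (out : List (List (String × String))) : Decidable (Spec_convert_to_styled_messages history out) := by unfold Spec_convert_to_styled_messages; infer_instance

-- ===== CLAIM (what is proved, stated in full; the proofs are below) =====
def Claim_equal_convert_to_styled_messages : Prop := ∀ (history : List (List (String × String))), Dom_convert_to_styled_messages history → Pre_convert_to_styled_messages history → Spec_convert_to_styled_messages history (convert_to_styled_messages history)

-- ===== LEMMAS AND PROOFS =====

-- common specification: the messages produced, two history items at a time
def pvPairs : List (List (String × String)) → List (List (String × String))
  | [] => []
  | [u] => if pvContent u ≠ "" then [[("role", "user"), ("content", pvContent u)]] else []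
  | u :: a :: rest =>
      ((if pvContent u ≠ "" then [[("role", "user"), ("content", pvContent u)]] else []) ++
       (if pvContent a ≠ "" then [[("role", "assistant"), ("content", pvContent a)]] else [])) ++ pvPairs rest

-- what B's loop produces from a tail starting at index s
def pvBSpec (s : Int) : List (List (String × String)) → List (List (String × String))
  | [] => []
  | d :: rest =>
      (if pvContent d ≠ "" then
        [[("role", if PySem.Int.mod s 2 == 0 then "user" else "assistant"), ("content", pvContent d)]]
       else []) ++ pvBSpec (s + 1) rest

theorem pvPyRange_two_nil (a b : Int) (h : b ≤ a) : PySem.List.pyRange a b 2 = [] := by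
  rw [PySem.List.pyRange_of_pos a b (by norm_num)]
  simp [show ¬ a < b by omega]

theorem pvPyRange_two_cons (a b : Int) (h : a < b) :
    PySem.List.pyRange a b 2 = a :: PySem.List.pyRange (a + 2) b 2 := by
  rw [PySem.List.pyRange_of_pos a b (by norm_num), PySem.List.pyRange_of_pos (a + 2) b (by norm_num)]
  have hN : (if a < b then ((b - a + 2 - 1) / 2).toNat else 0)
      = (if a + 2 < b then ((b - (a + 2) + 2 - 1) / 2).toNat else 0) + 1 := by
    split_ifs <;> omega
  rw [hN, List.range_succ_eq_map]
  simp only [List.map_cons, List.map_map, Nat.cast_zero, mul_zero, add_zero, List.cons.injEq]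
  refine ⟨trivial, List.map_congr_left ?_⟩
  intro k _
  simp only [Function.comp_apply]
  push_cast
  ring

theorem pv_getD_append (pre t : List (List (String × String))) (u : List (String × String))
    (h : t[0]? = some u) : (pre ++ t).getD pre.length [] = u := by
  have : (pre ++ t)[pre.length]? = some u := by
    rw [List.getElem?_append_right (by omega)]
    simpa using h
  simp [List.getD, this]

theorem pvA_go (t : List (List (String × String))) : ∀ (pre : List (List (String × String)))
    (acc : List (List (String × String))),
    (PySem.List.pyRange (pre.length : Int) ((pre.length : Int) + (t.length : Int)) 2).foldl
        (pvStepA (pre ++ t)) acc = acc ++ pvPairs t := by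
  match t with
  | [] =>
    intro pre acc
    rw [pvPyRange_two_nil _ _ (by simp), pvPairs]
    simp
  | [u] =>
    intro pre acc
    have hl1 : (([u] : List (List (String × String))).length : Int) = 1 := by simp
    rw [hl1, pvPyRange_two_cons _ _ (by omega), pvPyRange_two_nil _ _ (by omega)]
    simp only [List.foldl_cons, List.foldl_nil]
    have hlen : PySem.List.len (pre ++ [u]) = (pre.length : Int) + 1 := by
      simp [PySem.List.len_eq]
    have hget : PySem.List.pyGetD (pre ++ [u]) (pre.length : Int) [] = u := by
      rw [PySem.List.pyGetD_natCast]
      exact pv_getD_append pre [u] u rfl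
    have hg1 : ((pre.length : Int) < (pre.length : Int) + 1) := by omega
    have hg2 : ¬((pre.length : Int) + 1 < (pre.length : Int) + 1) := by omega
    simp only [pvStepA, pvPairs, hlen, hget]
    simp only [if_pos hg1, if_neg hg2]
    split_ifs <;> simp_all
  | u :: a :: rest =>
    intro pre acc
    have hl2 : ((u :: a :: rest).length : Int) = (rest.length : Int) + 2 := by
      simp only [List.length_cons]; push_cast; ring
    rw [hl2, pvPyRange_two_cons _ _ (by omega)]
    simp only [List.foldl_cons]
    have hlen : PySem.List.len (pre ++ u :: a :: rest) = (pre.length : Int) + ((rest.length : Int) + 2) := by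
      simp [PySem.List.len_eq]; ring
    have hgu : PySem.List.pyGetD (pre ++ u :: a :: rest) (pre.length : Int) [] = u := by
      rw [PySem.List.pyGetD_natCast]
      exact pv_getD_append pre (u :: a :: rest) u rfl
    have hga : PySem.List.pyGetD (pre ++ u :: a :: rest) ((pre.length : Int) + 1) [] = a := by
      rw [show ((pre.length : Int) + 1) = (((pre.length + 1 : Nat)) : Int) by simp,
        PySem.List.pyGetD_natCast]
      have h := pv_getD_append (pre ++ [u]) (a :: rest) a rfl
      simp only [List.append_assoc, List.cons_append, List.nil_append,
        List.length_append, List.length_cons, List.length_nil] at h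
      exact h
    have key := pvA_go rest (pre ++ [u, a]) (pvStepA (pre ++ u :: a :: rest) acc (pre.length : Int))
    have harg : ((pre ++ [u, a]).length : Int) = (pre.length : Int) + 2 := by
      simp only [List.length_append, List.length_cons, List.length_nil]; push_cast; ring
    rw [harg, show (pre ++ [u, a]) ++ rest = pre ++ u :: a :: rest by simp] at key
    rw [show (pre.length : Int) + ((rest.length : Int) + 2) = (pre.length : Int) + 2 + (rest.length : Int) by ring]
    rw [key, pvPairs]
    have hg1 : ((pre.length : Int) < (pre.length : Int) + ((rest.length : Int) + 2)) := by omega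
    have hg2 : ((pre.length : Int) + 1 < (pre.length : Int) + ((rest.length : Int) + 2)) := by omega
    simp only [pvStepA, hlen, hgu, hga, if_pos hg1, if_pos hg2]
    split_ifs <;> simp
termination_by t.length

theorem pvB_go (t : List (List (String × String))) : ∀ (s : Int) (acc : List (List (String × String))),
    (PySem.List.enumerate t s).foldl pvStepB acc = acc ++ pvBSpec s t := by
  induction t with
  | nil => intro s acc; simp [PySem.List.enumerate_nil, pvBSpec]
  | cons d rest ih =>
    intro s acc
    rw [PySem.List.enumerate_cons, List.foldl_cons, ih]
    simp only [pvBSpec, pvStepB]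
    split_ifs <;> simp

theorem pvBSpec_even (t : List (List (String × String))) : ∀ (s : Int),
    PySem.Int.mod s 2 = 0 → pvBSpec s t = pvPairs t := by
  match t with
  | [] => intro s _; rfl
  | [u] =>
    intro s hs
    simp only [pvBSpec, pvPairs, hs]
    simp
  | u :: a :: rest =>
    intro s hs
    have h2 : (0 : Int) < 2 := by norm_num
    have hs' : s % 2 = 0 := by rw [← PySem.Int.mod_eq_emod_of_pos h2]; exact hs
    have h1 : PySem.Int.mod (s + 1) 2 = 1 := by
      rw [PySem.Int.mod_eq_emod_of_pos h2]; omega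
    have hrec : PySem.Int.mod (s + 1 + 1) 2 = 0 := by
      rw [PySem.Int.mod_eq_emod_of_pos h2]; omega
    simp only [pvBSpec, pvPairs, hs, h1, pvBSpec_even rest (s + 1 + 1) hrec]
    split_ifs <;> simp_all
termination_by t.length

-- ===== VERDICT (by name: the statement is the Claim_ definition above) =====
theorem convert_to_styled_messages_spec : Claim_equal_convert_to_styled_messages := by
  intro history _ _
  unfold Spec_convert_to_styled_messages convert_to_styled_messages convert_to_styled_messages_alt
  have hA := pvA_go history [] []
  simp only [List.length_nil, Nat.cast_zero, List.nil_append, zero_add] at hA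
  rw [PySem.List.len_eq, hA]
  rw [pvB_go history 0 [], pvBSpec_even history 0 (by decide)]
  simp
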